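-- pv_equiv track=rewrite | github.com/mmiland99/AI_DEV_TEST | email_processing_agent.py | resolution_quotes_are_later
-- ===== SOURCE A (Python) =====
-- from typing import List, Optional, Dict, Any, Literal, Tuple
--
-- def locate_quote_msg_index(msg_chunks: List[str], quote: str) -> Optional[int]:
--     q = (quote or "").strip()
--     if not q:
--         return None
--     for idx, chunk in enumerate(msg_chunks, 1):
--         if q in chunk:
--             return idx
--     return None
--
-- def max_problem_msg_index(msg_chunks: List[str], evidence_quotes: List[str]) -> int:
--     idxs = [locate_quote_msg_index(msg_chunks, q) for q in (evidence_quotes or [])]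
--     idxs = [i for i in idxs if isinstance(i, int)]
--     return max(idxs) if idxs else 0
--
-- def resolution_quotes_are_later(msg_chunks: List[str], evidence_quotes: List[str], resolution_quotes: List[str]) -> bool:
--     prob_max = max_problem_msg_index(msg_chunks, evidence_quotes)
--     if prob_max == 0:
--         return True
--     for rq in resolution_quotes or []:
--         ridx = locate_quote_msg_index(msg_chunks, rq)
--         if ridx is None or ridx <= prob_max:
--             return False
--     return True
-- ===== SOURCE B (Python) =====
-- def resolution_quotes_are_later(msg_chunks, evidence_quotes, resolution_quotes):
--     ev = list(evidence_quotes or [])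
--     rq = list(resolution_quotes or [])
--     targets = [q.strip() for q in ev + rq]
--     # one chunk-major sweep: first chunk index (1-based) containing each non-empty stripped quote
--     first_idx = {}
--     for i, chunk in enumerate(msg_chunks, 1):
--         for t in targets:
--             if t and t not in first_idx and t in chunk:
--                 first_idx[t] = i
--     prob_max = 0
--     for q in ev:
--         j = first_idx.get(q.strip())
--         if j is not None and prob_max < j:
--             prob_max = j
--     if prob_max == 0:
--         return True
--     return all(q.strip() in first_idx and first_idx[q.strip()] > prob_max
--                for q in rq)
-- ===== Notes on version B (the rewrite author's own statement) =====
-- stated objective: alternative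
-- what changed: Replaced the per-quote rescans of msg_chunks (one locate pass per evidence quote and again per resolution quote) by a single chunk-major sweep that builds a first-occurrence index dict for all stripped quotes at once, then reads prob_max and the resolution check off that dict.
import Mathlib
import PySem

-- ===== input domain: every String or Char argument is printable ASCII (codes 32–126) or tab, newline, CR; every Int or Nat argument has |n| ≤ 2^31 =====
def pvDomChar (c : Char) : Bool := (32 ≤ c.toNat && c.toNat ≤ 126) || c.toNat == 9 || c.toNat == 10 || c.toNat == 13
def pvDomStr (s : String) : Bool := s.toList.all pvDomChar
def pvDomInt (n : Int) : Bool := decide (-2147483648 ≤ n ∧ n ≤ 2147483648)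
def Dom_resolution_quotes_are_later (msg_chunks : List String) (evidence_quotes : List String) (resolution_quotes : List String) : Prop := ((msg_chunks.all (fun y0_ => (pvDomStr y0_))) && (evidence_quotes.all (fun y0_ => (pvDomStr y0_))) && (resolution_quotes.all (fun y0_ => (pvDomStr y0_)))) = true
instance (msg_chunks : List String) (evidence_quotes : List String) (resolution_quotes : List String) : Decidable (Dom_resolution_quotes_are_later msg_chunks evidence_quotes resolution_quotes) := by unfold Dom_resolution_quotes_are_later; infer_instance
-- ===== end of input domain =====

-- B replaces A's per-quote rescans of msg_chunks by one chunk-major sweep building a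
-- first-occurrence index dict for all stripped quotes (alternative decomposition, same cost).

-- ===== PORT A =====
-- the enumerate(msg_chunks, 1) scan inside locate_quote_msg_index
def pvLocGo (q : String) : List String → Int → Option Int
  | [], _ => none
  | c :: rest, idx => if PySem.Str.isIn q c then some idx else pvLocGo q rest (idx + 1)
def locate_quote_msg_index (msg_chunks : List String) (quote : String) : Option Int :=
  let q := PySem.Str.strip quote
  if q = "" then none else pvLocGo q msg_chunks 1
def max_problem_msg_index (msg_chunks : List String) (evidence_quotes : List String) : Int :=
  let idxs := evidence_quotes.map (fun q => locate_quote_msg_index msg_chunks q)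
  let idxs2 := idxs.filterMap (fun i => i)
  if idxs2.isEmpty then 0 else (PySem.List.max? idxs2 (fun y => y)).getD 0


-- the early-return loop over resolution_quotes
def pvResLoop (msg_chunks : List String) (prob_max : Int) : List String → Bool
  | [] => true
  | rq :: rest =>
      match locate_quote_msg_index msg_chunks rq with
      | none => false
      | some ridx => if ridx ≤ prob_max then false else pvResLoop msg_chunks prob_max rest


def resolution_quotes_are_later (msg_chunks : List String) (evidence_quotes : List String) (resolution_quotes : List String) : Bool :=
  let prob_max := max_problem_msg_index msg_chunks evidence_quotes
  if prob_max = 0 then true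
  else pvResLoop msg_chunks prob_max resolution_quotes


-- ===== PORT B =====
-- inner loop body: if t and t not in first_idx and t in chunk: first_idx[t] = i
def pvStep (c : String) (i : Int) (d : PySem.Dict String Int) (t : String) : PySem.Dict String Int :=
  if t ≠ "" ∧ d.contains t = false ∧ PySem.Str.isIn t c = true then d.insert t i else d
def pvBuild (targets : List String) : List String → Int → PySem.Dict String Int → PySem.Dict String Int
  | [], _, d => d
  | c :: rest, i, d => pvBuild targets rest (i + 1) (targets.foldl (pvStep c i) d)
def resolution_quotes_are_later_alt (msg_chunks : List String) (evidence_quotes : List String) (resolution_quotes : List String) : Bool :=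
  let targets := (evidence_quotes ++ resolution_quotes).map PySem.Str.strip
  let first_idx := pvBuild targets msg_chunks 1 PySem.Dict.empty
  let prob_max := evidence_quotes.foldl (fun acc q =>
      match first_idx.get? (PySem.Str.strip q) with
      | some j => if acc < j then j else acc
      | none => acc) 0
  if prob_max = 0 then true
  else resolution_quotes.all (fun q =>
      match first_idx.get? (PySem.Str.strip q) with
      | some j => decide (prob_max < j)
      | none => false)


-- ===== PRECONDITION & SPEC =====
def Spec_resolution_quotes_are_later (msg_chunks : List String) (evidence_quotes : List String) (resolution_quotes : List String) (out : Bool) : Prop := out = resolution_quotes_are_later_alt msg_chunks evidence_quotes resolution_quotes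
instance (msg_chunks : List String) (evidence_quotes : List String) (resolution_quotes : List String) (out : Bool) : Decidable (Spec_resolution_quotes_are_later msg_chunks evidence_quotes resolution_quotes out) := by unfold Spec_resolution_quotes_are_later; infer_instance

-- ===== CLAIM (what is proved, stated in full; the proofs are below) =====
def Claim_equal_resolution_quotes_are_later : Prop := ∀ (msg_chunks : List String) (evidence_quotes : List String) (resolution_quotes : List String), Dom_resolution_quotes_are_later msg_chunks evidence_quotes resolution_quotes → Spec_resolution_quotes_are_later msg_chunks evidence_quotes resolution_quotes (resolution_quotes_are_later msg_chunks evidence_quotes resolution_quotes)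

-- ===== LEMMAS AND PROOFS =====

-- one chunk's inner loop over targets, fully characterised
lemma pv_inner (c : String) (i : Int) (ts : List String) (d : PySem.Dict String Int) (t : String) :
    (ts.foldl (pvStep c i) d).get? t =
      if t ∈ ts ∧ t ≠ "" ∧ d.contains t = false ∧ PySem.Str.isIn t c = true then some i
      else d.get? t := by
  induction ts generalizing d with
  | nil => simp
  | cons t' rest ih =>
    simp only [List.foldl_cons]
    rw [ih]
    by_cases h2 : t = t'
    · subst h2
      unfold pvStep
      by_cases h1 : t ≠ "" ∧ d.contains t = false ∧ PySem.Str.isIn t c = true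
      · rw [if_pos h1]
        rw [if_neg (by simp [PySem.Dict.contains_insert_self]), PySem.Dict.get?_insert_self,
            if_pos ⟨List.mem_cons_self .., h1⟩]
      · rw [if_neg h1, if_neg (by tauto), if_neg (by simp only [List.mem_cons]; tauto)]
    · have hm : (t ∈ t' :: rest) ↔ t ∈ rest := by simp [List.mem_cons, h2]
      unfold pvStep
      by_cases h1 : t' ≠ "" ∧ d.contains t' = false ∧ PySem.Str.isIn t' c = true
      · rw [if_pos h1]
        simp only [PySem.Dict.get?_insert, PySem.Dict.contains_insert, hm,
          if_neg h2, beq_eq_false_iff_ne.mpr h2, Bool.false_or]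
      · rw [if_neg h1]
        simp only [hm]
-- the whole chunk-major build, characterised by A's scan pvLocGo
lemma pv_outer (targets : List String) (t : String) :
    ∀ (chunks : List String) (i : Int) (d : PySem.Dict String Int),
      (pvBuild targets chunks i d).get? t =
        if d.contains t = true then d.get? t
        else if t ∈ targets ∧ t ≠ "" then pvLocGo t chunks i else none := by
  intro chunks
  induction chunks with
  | nil =>
    intro i d
    by_cases hc : d.contains t = true
    · simp [pvBuild, hc]
    · have hn : d.get? t = none := by
        rw [← Option.not_isSome_iff_eq_none, ← PySem.Dict.contains_eq_isSome_get?]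
        simpa using hc
      simp [pvBuild, hc, hn, pvLocGo]
  | cons c rest ih =>
    intro i d
    show (pvBuild targets rest (i + 1) (targets.foldl (pvStep c i) d)).get? t = _
    rw [ih]
    have hget := pv_inner c i targets d t
    have hcon : (targets.foldl (pvStep c i) d).contains t
        = ((targets.foldl (pvStep c i) d).get? t).isSome := PySem.Dict.contains_eq_isSome_get? ..
    by_cases hc : d.contains t = true
    · have hd : (targets.foldl (pvStep c i) d).get? t = d.get? t := by
        rw [hget, if_neg (by simp [hc])]
      rw [hd] at hcon
      rw [if_pos (by rw [hcon, ← PySem.Dict.contains_eq_isSome_get?]; exact hc), hd, if_pos hc]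
    · have hcf : d.contains t = false := by simpa using hc
      have hn : d.get? t = none := by
        rw [← Option.not_isSome_iff_eq_none, ← PySem.Dict.contains_eq_isSome_get?]; simp [hcf]
      rw [if_neg hc]
      by_cases hq : t ∈ targets ∧ t ≠ ""
      · by_cases hin : PySem.Str.isIn t c = true
        · have hd : (targets.foldl (pvStep c i) d).get? t = some i := by
            rw [hget, if_pos ⟨hq.1, hq.2, hcf, hin⟩]
          have hin' : PySem.Chars.isIn t.toList c.toList = true := by simpa using hin
          rw [if_pos (by rw [hcon, hd]; rfl), hd, if_pos hq]
          show some i = pvLocGo t (c :: rest) i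
          simp [pvLocGo, hin']
        · have hin' : PySem.Chars.isIn t.toList c.toList = false := by
            simpa using hin
          have hd : (targets.foldl (pvStep c i) d).get? t = none := by
            rw [hget, if_neg (by tauto), hn]
          rw [if_neg (by rw [hcon, hd]; simp), if_pos hq, if_pos hq]
          simp [pvLocGo, hin']
      · have hd : (targets.foldl (pvStep c i) d).get? t = none := by
          rw [hget, if_neg (by tauto), hn]
        rw [if_neg (by rw [hcon, hd]; simp), if_neg hq, if_neg hq]
-- dict lookup = A's locate, for stripped quotes among the targets
lemma pv_lookup (targets chunks : List String) (q : String)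
    (hmem : PySem.Str.strip q ∈ targets) :
    (pvBuild targets chunks 1 PySem.Dict.empty).get? (PySem.Str.strip q)
      = locate_quote_msg_index chunks q := by
  rw [pv_outer, if_neg (by simp [PySem.Dict.contains_empty])]
  unfold locate_quote_msg_index
  by_cases he : PySem.Str.strip q = ""
  · rw [if_neg (by tauto), if_pos he]
  · rw [if_pos ⟨hmem, he⟩, if_neg he]

-- pvLocGo results are bounded below by the start index
lemma pvLocGo_ge (q : String) : ∀ (chunks : List String) (i j : Int),
    pvLocGo q chunks i = some j → i ≤ j := by
  intro chunks
  induction chunks with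
  | nil => intro i j h; simp [pvLocGo] at h
  | cons c rest ih =>
    intro i j h
    by_cases hin : PySem.Chars.isIn q.toList c.toList = true
    · simp [pvLocGo, hin] at h; omega
    · have hin' : PySem.Chars.isIn q.toList c.toList = false := by simpa using hin
      simp [pvLocGo, hin'] at h
      have := ih (i + 1) j h
      omega

lemma locate_pos (chunks : List String) (q : String) (j : Int)
    (h : locate_quote_msg_index chunks q = some j) : 1 ≤ j := by
  unfold locate_quote_msg_index at h
  by_cases he : PySem.Str.strip q = ""
  · simp [he] at h
  · rw [if_neg he] at h
    exact pvLocGo_ge _ _ _ _ h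

-- the running-max fold over an option-producing lookup = max fold over the found values
lemma pv_foldopt (f : String → Option Int) (ev : List String) :
    ∀ (a : Int),
      ev.foldl (fun acc q => match f q with
        | some j => if acc < j then j else acc
        | none => acc) a
      = (ev.filterMap f).foldl max a := by
  induction ev with
  | nil => intro a; simp
  | cons q rest ih =>
    intro a
    simp only [List.foldl_cons, List.filterMap_cons]
    cases hf : f q with
    | none => simp [ih]
    | some j =>
      simp only [List.foldl_cons, ih]
      congr 1
      by_cases h : a < j
      · rw [if_pos h, max_eq_right (le_of_lt h)]
      · rw [if_neg h, max_eq_left (by omega)]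

-- A's max_problem_msg_index is B's running-max fold
lemma pv_probmax (chunks ev : List String) :
    max_problem_msg_index chunks ev
      = (ev.filterMap (fun q => locate_quote_msg_index chunks q)).foldl max 0 := by
  unfold max_problem_msg_index
  simp only [List.filterMap_map, Function.comp_def]
  cases hc : ev.filterMap (fun q => locate_quote_msg_index chunks q) with
  | nil => simp
  | cons x t =>
    have hx : (1 : Int) ≤ x := by
      have hm : x ∈ ev.filterMap (fun q => locate_quote_msg_index chunks q) := by
        rw [hc]; exact List.mem_cons_self ..
      obtain ⟨q, _, hq⟩ := List.mem_filterMap.mp hm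
      exact locate_pos chunks q x hq
    rw [if_neg (by simp), PySem.List.max?_id_cons]
    show t.foldl max x = (x :: t).foldl max 0
    rw [List.foldl_cons, max_eq_right (by omega)]
-- A's early-return loop is an all over the same per-quote test
lemma pv_resloop (chunks : List String) (pm : Int) : ∀ (rqs : List String),
    pvResLoop chunks pm rqs = rqs.all (fun q =>
      match locate_quote_msg_index chunks q with
      | some j => decide (pm < j)
      | none => false) := by
  intro rqs
  induction rqs with
  | nil => rfl
  | cons q rest ih =>
    show (match locate_quote_msg_index chunks q with
      | none => false
      | some ridx => if ridx ≤ pm then false else pvResLoop chunks pm rest) = _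
    cases h : locate_quote_msg_index chunks q with
    | none => simp [List.all_cons, h]
    | some j =>
      by_cases hle : j ≤ pm
      · simp [List.all_cons, h, if_pos hle, decide_eq_false (by omega : ¬ pm < j)]
      · simp [List.all_cons, h, if_neg hle, decide_eq_true (by omega : pm < j), ih]

-- all respects pointwise-equal predicates on the list's members
lemma pv_all_congr (l : List String) (p q : String → Bool) (h : ∀ x ∈ l, p x = q x) :
    l.all p = l.all q := by
  induction l with
  | nil => rfl
  | cons x t ih =>
    simp only [List.all_cons, h x (List.mem_cons_self ..),
      ih (fun y hy => h y (List.mem_cons_of_mem _ hy))]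


-- ===== VERDICT (by name: the statement is the Claim_ definition above) =====
theorem resolution_quotes_are_later_spec : Claim_equal_resolution_quotes_are_later := by
  intro mc ev rq _hdom
  unfold Spec_resolution_quotes_are_later
  simp only [resolution_quotes_are_later, resolution_quotes_are_later_alt]
  have hlook : ∀ q ∈ ev ++ rq,
      (pvBuild ((ev ++ rq).map PySem.Str.strip) mc 1 PySem.Dict.empty).get? (PySem.Str.strip q)
        = locate_quote_msg_index mc q := by
    intro q hq
    exact pv_lookup _ _ _ (List.mem_map_of_mem hq)
  have hpm := PySem.List.foldl_congr_mem ev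
      (fun acc q =>
        match (pvBuild ((ev ++ rq).map PySem.Str.strip) mc 1 PySem.Dict.empty).get? (PySem.Str.strip q) with
        | some j => if acc < j then j else acc
        | none => acc)
      (fun acc q =>
        match locate_quote_msg_index mc q with
        | some j => if acc < j then j else acc
        | none => acc)
      0
      (by intro acc x hx; simp only [hlook x (List.mem_append_left _ hx)])
  rw [hpm, pv_foldopt (fun q => locate_quote_msg_index mc q) ev 0, ← pv_probmax]
  by_cases h0 : max_problem_msg_index mc ev = 0
  · simp [h0]
  · rw [if_neg h0, if_neg h0, pv_resloop]
    exact pv_all_congr _ _ _ (fun q hq => by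
      simp only [hlook q (List.mem_append_right _ hq)])
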